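-- pv_equiv track=rewrite | github.com/DasLab/arnie | src/arnie/utils.py | _get_list_bp_conflicts
-- ===== SOURCE A (Python) =====
-- def _get_list_bp_conflicts(bp_list):
--     '''given a bp_list gives the list of conflicts bp-s which indicate PK structure
--     Args:
--             bp_list: of list of base pairs where the base pairs are list of indeces of the bp in increasing order (bp[0]<bp[1])
--     returns:
--             List of conflicting basepairs, where conflicting is pairs of base pairs that are intertwined.
--     '''
--     if len(bp_list) <= 1:
--         return []
--     else:
--         current_bp = bp_list[0]
--         conflicts = []
--         for bp in bp_list[1:]:
--             if (bp[0] < current_bp[1] and current_bp[1] < bp[1]):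
--                 conflicts.append([current_bp, bp])
--         return conflicts + _get_list_bp_conflicts(bp_list[1:])
-- ===== SOURCE B (Python) =====
-- def _get_list_bp_conflicts(bp_list):
--     conflicts = []
--     n = len(bp_list)
--     for i in range(n):
--         ci = bp_list[i]
--         for j in range(i + 1, n):
--             bj = bp_list[j]
--             if bj[0] < ci[1] < bj[1]:
--                 conflicts.append([ci, bj])
--     return conflicts
-- ===== Notes on version B (the rewrite author's own statement) =====
-- stated objective: idiomatic
-- what changed: Replaces A's tail recursion with copied slices (bp_list[1:] at every level) by a single iterative double index loop over the list, appending to one accumulator; no slice copies and no recursion.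
-- outside the precondition, e.g. on _get_list_bp_conflicts([[1, 5], [9]]): A returns [], B returns []; on _get_list_bp_conflicts([[3], [1, 5]]): A raises IndexError, B raises IndexError
import Mathlib
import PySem

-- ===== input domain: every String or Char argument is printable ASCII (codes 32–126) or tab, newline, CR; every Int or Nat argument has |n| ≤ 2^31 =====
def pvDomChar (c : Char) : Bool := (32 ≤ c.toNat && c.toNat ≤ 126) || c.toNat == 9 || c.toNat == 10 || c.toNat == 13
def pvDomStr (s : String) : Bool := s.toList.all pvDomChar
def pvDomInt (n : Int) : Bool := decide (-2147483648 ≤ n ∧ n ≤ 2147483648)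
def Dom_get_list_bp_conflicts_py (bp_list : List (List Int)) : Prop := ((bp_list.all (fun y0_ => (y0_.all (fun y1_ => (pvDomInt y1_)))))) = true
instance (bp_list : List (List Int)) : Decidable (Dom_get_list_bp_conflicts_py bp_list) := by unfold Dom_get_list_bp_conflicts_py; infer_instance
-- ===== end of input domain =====

-- B replaces A's slice-copying tail recursion by one iterative double index loop (same O(n^2) pair scan, no recursion, no slice copies).

-- ===== PORT A =====
-- literal port of A: len<=1 returns [], else scan the tail against the head, then recurse on the tail slice
def get_list_bp_conflicts_py : List (List Int) → List (List (List Int))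
  | [] => []
  | [_] => []
  | cur :: b :: bs =>
    ((b :: bs).foldl (fun conflicts bp =>
      if PySem.List.pyGetD bp 0 0 < PySem.List.pyGetD cur 1 0 ∧
         PySem.List.pyGetD cur 1 0 < PySem.List.pyGetD bp 1 0
      then conflicts ++ [[cur, bp]] else conflicts) [])
    ++ get_list_bp_conflicts_py (b :: bs)

-- ===== PORT B =====
-- literal port of B: for i in range(n): for j in range(i+1, n): append on the crossing test
def get_list_bp_conflicts_py_alt (bp_list : List (List Int)) : List (List (List Int)) :=
  (PySem.List.pyRange 0 (bp_list.length : Int) 1).foldl (fun conflicts i =>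
    let ci := PySem.List.pyGetD bp_list i []
    (PySem.List.pyRange (i + 1) (bp_list.length : Int) 1).foldl (fun conflicts j =>
      let bj := PySem.List.pyGetD bp_list j []
      if PySem.List.pyGetD bj 0 0 < PySem.List.pyGetD ci 1 0 ∧
         PySem.List.pyGetD ci 1 0 < PySem.List.pyGetD bj 1 0
      then conflicts ++ [[ci, bj]] else conflicts) conflicts) []

-- ===== PRECONDITION & SPEC =====
-- Pre_ excludes lists of length ≥ 2 containing a base pair with fewer than two indices: there the
-- Python A (and B) can hit bp[0]/bp[1]/current_bp[1] on a too-short pair and raise IndexError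
-- (on a few such inputs the failing comparison is never reached and A still returns an empty result; Pre_ is
-- closed-form and conservatively excludes those too).
def Pre_get_list_bp_conflicts_py (bp_list : List (List Int)) : Prop :=
  bp_list.length ≤ 1 ∨ ∀ bp ∈ bp_list, 2 ≤ bp.length
instance (bp_list : List (List Int)) : Decidable (Pre_get_list_bp_conflicts_py bp_list) := by
  unfold Pre_get_list_bp_conflicts_py; infer_instance

def pvWitness_get_list_bp_conflicts_py : List (List Int) := [[0, 4], [2, 6], [5, 9]]

def Spec_get_list_bp_conflicts_py (bp_list : List (List Int)) (out : List (List (List Int))) : Prop := out = get_list_bp_conflicts_py_alt bp_list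
instance (bp_list : List (List Int)) (out : List (List (List Int))) : Decidable (Spec_get_list_bp_conflicts_py bp_list out) := by unfold Spec_get_list_bp_conflicts_py; infer_instance

-- ===== CLAIM (what is proved, stated in full; the proofs are below) =====
def Claim_equal_get_list_bp_conflicts_py : Prop := ∀ (bp_list : List (List Int)), Dom_get_list_bp_conflicts_py bp_list → Pre_get_list_bp_conflicts_py bp_list → Spec_get_list_bp_conflicts_py bp_list (get_list_bp_conflicts_py bp_list)

-- ===== LEMMAS AND PROOFS =====

-- A's inner scan with an arbitrary accumulator prepends the accumulator
theorem pvInner_acc (cur : List Int) (l : List (List Int)) (acc : List (List (List Int))) :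
    l.foldl (fun conflicts bp =>
      if PySem.List.pyGetD bp 0 0 < PySem.List.pyGetD cur 1 0 ∧
         PySem.List.pyGetD cur 1 0 < PySem.List.pyGetD bp 1 0
      then conflicts ++ [[cur, bp]] else conflicts) acc
    = acc ++ l.foldl (fun conflicts bp =>
      if PySem.List.pyGetD bp 0 0 < PySem.List.pyGetD cur 1 0 ∧
         PySem.List.pyGetD cur 1 0 < PySem.List.pyGetD bp 1 0
      then conflicts ++ [[cur, bp]] else conflicts) [] := by
  induction l generalizing acc with
  | nil => simp
  | cons b bs ih =>
    simp only [List.foldl_cons]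
    rw [ih]
    conv_rhs => rw [ih]
    split_ifs <;> simp

-- A's recursion unrolled one step, valid also for an empty tail
theorem pvPortA_cons (cur : List Int) (rest : List (List Int)) :
    get_list_bp_conflicts_py (cur :: rest)
    = rest.foldl (fun conflicts bp =>
        if PySem.List.pyGetD bp 0 0 < PySem.List.pyGetD cur 1 0 ∧
           PySem.List.pyGetD cur 1 0 < PySem.List.pyGetD bp 1 0
        then conflicts ++ [[cur, bp]] else conflicts) []
      ++ get_list_bp_conflicts_py rest := by
  cases rest <;> simp [get_list_bp_conflicts_py]

-- B's outer loop from index k computes A's answer on the k-th tail of the list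
theorem pvOuter (xs : List (List Int)) (tail : List (List Int)) :
    ∀ (k : Nat) (acc : List (List (List Int))), xs.drop k = tail →
    (PySem.List.pyRange (k : Int) (xs.length : Int) 1).foldl (fun conflicts i =>
      let ci := PySem.List.pyGetD xs i []
      (PySem.List.pyRange (i + 1) (xs.length : Int) 1).foldl (fun conflicts j =>
        let bj := PySem.List.pyGetD xs j []
        if PySem.List.pyGetD bj 0 0 < PySem.List.pyGetD ci 1 0 ∧
           PySem.List.pyGetD ci 1 0 < PySem.List.pyGetD bj 1 0
        then conflicts ++ [[ci, bj]] else conflicts) conflicts) acc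
    = acc ++ get_list_bp_conflicts_py tail := by
  induction tail with
  | nil =>
    intro k acc h
    have hk : xs.length ≤ k := by
      have := congrArg List.length h
      simp at this
      omega
    rw [PySem.List.pyRange_one_eq_nil (by exact_mod_cast hk)]
    simp [get_list_bp_conflicts_py]
  | cons cur rest ih =>
    intro k acc h
    have hk : k < xs.length := by
      have := congrArg List.length h
      simp at this
      omega
    have hcur : PySem.List.pyGetD xs (k : Int) [] = cur := by
      rw [PySem.List.pyGetD_natCast, List.getD_eq_getElem _ _ hk]
      have h0 : (xs.drop k)[0]'(by simp [h]) = cur := by simp [h]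
      rw [List.getElem_drop] at h0
      simpa using h0
    have hrest : xs.drop (k + 1) = rest := by
      rw [← List.drop_drop, h]; simp
    rw [PySem.List.pyRange_one_cons (by exact_mod_cast hk), List.foldl_cons]
    have hcast : ((k : Int) + 1) = ((k + 1 : Nat) : Int) := by push_cast; ring
    simp only [hcast, hcur]
    rw [PySem.List.foldl_pyRange_pyGetD' xs []
      (fun conflicts bj =>
        if PySem.List.pyGetD bj 0 0 < PySem.List.pyGetD cur 1 0 ∧
           PySem.List.pyGetD cur 1 0 < PySem.List.pyGetD bj 1 0
        then conflicts ++ [[cur, bj]] else conflicts) acc (by positivity)]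
    have htoNat : ((k + 1 : Nat) : Int).toNat = k + 1 := by omega
    rw [htoNat, hrest, ih (k + 1) _ hrest, pvInner_acc, pvPortA_cons]
    simp

-- ===== VERDICT (by name: the statement is the Claim_ definition above) =====
theorem get_list_bp_conflicts_py_spec : Claim_equal_get_list_bp_conflicts_py := by
  intro bp_list _ _
  unfold Spec_get_list_bp_conflicts_py get_list_bp_conflicts_py_alt
  have h := pvOuter bp_list bp_list 0 [] (by simp)
  simpa using h.symm
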